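-- pv_equiv track=rewrite | github.com/Shiva-Prasad-Naroju/RTGS-AI-Analyst | agents/inspector_agent.py | _suggest_column_name
-- ===== SOURCE A (Python) =====
-- def _suggest_column_name(col: str) -> str:
--     """Suggest a clean column name"""
--     # Remove special chars, replace spaces with underscores
--     clean = col.strip()
--     clean = ''.join(c if c.isalnum() or c == '_' else '_' for c in clean)
--     clean = clean.replace(' ', '_')
--     # Remove consecutive underscores
--     while '__' in clean:
--         clean = clean.replace('__', '_')
--     clean = clean.strip('_')
--     return clean
-- ===== SOURCE B (Python) =====
-- def _suggest_column_name(col: str) -> str: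
--     out = []
--     prev_us = False
--     for c in col.strip():
--         if c.isalnum():
--             out.append(c)
--             prev_us = False
--         elif not prev_us:
--             out.append('_')
--             prev_us = True
--     return ''.join(out).strip('_')
-- ===== Notes on version B (the rewrite author's own statement) =====
-- stated objective: simpler
-- what changed: A maps every character, runs a space-replacing pass, then repeatedly rescans the whole string replacing double underscores until none remain; B builds the result in one forward pass, emitting an underscore for a non-alphanumeric character only when the previously emitted character was not already an underscore.
import Mathlib
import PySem

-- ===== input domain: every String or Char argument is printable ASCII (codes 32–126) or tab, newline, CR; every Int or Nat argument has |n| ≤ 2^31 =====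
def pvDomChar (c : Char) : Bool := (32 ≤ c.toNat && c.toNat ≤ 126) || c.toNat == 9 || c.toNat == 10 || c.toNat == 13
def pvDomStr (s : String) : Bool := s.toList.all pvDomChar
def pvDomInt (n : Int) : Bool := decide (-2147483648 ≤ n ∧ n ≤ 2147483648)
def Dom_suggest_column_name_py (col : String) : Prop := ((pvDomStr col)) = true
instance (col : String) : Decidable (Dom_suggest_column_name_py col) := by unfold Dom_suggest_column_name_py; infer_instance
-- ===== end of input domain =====

-- B replaces A's character-map plus repeated replace('__','_') passes by a single forward pass
-- with a "previous emitted char was '_'" flag; same return value, different decomposition.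

-- ===== PORT A =====
-- Helpers needed only for port A's while-loop termination (pvWhileA cites pvLoop_dec in decreasing_by).
/-- One left-to-right pass replacing "__" by "_" (characterises `replace cs "__" "_"`). -/
def pvRep1 : List Char → List Char
  | c :: d :: t => if c = '_' ∧ d = '_' then '_' :: pvRep1 t else c :: pvRep1 (d :: t)
  | l => l

/-- `cs` contains two adjacent underscores. -/
def pvHasDD : List Char → Bool
  | c :: d :: t => (c = '_' && d = '_') || pvHasDD (d :: t)
  | _ => false

theorem pvRep1_length_le (l : List Char) : (pvRep1 l).length ≤ l.length := by
  induction l using pvRep1.induct with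
  | case1 c d t h ih =>
    rw [pvRep1, if_pos h]; simp at ih ⊢; omega
  | case2 c d t h ih =>
    rw [pvRep1, if_neg h]; simp at ih ⊢; omega
  | case3 l hl => rw [pvRep1.eq_def]; cases l with
    | nil => simp
    | cons c t => cases t with
      | nil => simp
      | cons d u => exact absurd rfl (hl c d u)

theorem pvRep1_length_lt (cs : List Char) (h : pvHasDD cs = true) :
    (pvRep1 cs).length < cs.length := by
  induction cs using pvRep1.induct with
  | case1 c d t hcd ih =>
    rw [pvRep1, if_pos hcd]
    have := pvRep1_length_le t; simp; omega
  | case2 c d t hcd ih =>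
    have hdd : pvHasDD (d :: t) = true := by
      have := (by simpa [pvHasDD] using h : (c = '_' ∧ d = '_') ∨ pvHasDD (d :: t) = true)
      exact this.resolve_left hcd
    rw [pvRep1, if_neg hcd]
    have := ih hdd; simp at this ⊢; omega
  | case3 l hl =>
    exfalso
    rw [pvHasDD.eq_def] at h
    cases l with
    | nil => simp at h
    | cons c t => cases t with
      | nil => simp at h
      | cons d u => exact hl c d u rfl

theorem pvReplace_go_dd (fuel : Nat) :
    ∀ (l acc : List Char), l.length ≤ fuel →
      PySem.Chars.replace.go ['_','_'] ['_'] fuel l acc = acc.reverse ++ pvRep1 l := by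
  induction fuel with
  | zero =>
    intro l acc h
    have : l = [] := List.eq_nil_of_length_eq_zero (by omega)
    subst this
    simp [PySem.Chars.replace.go, pvRep1]
  | succ n ih =>
    intro l acc h
    match l with
    | [] => simp [PySem.Chars.replace.go, pvRep1]
    | c :: t =>
      by_cases hp : List.isPrefixOf ['_','_'] (c :: t) = true
      · obtain ⟨d, u, rfl⟩ : ∃ d u, t = d :: u := by
          cases t with
          | nil => simp [List.isPrefixOf] at hp
          | cons d u => exact ⟨d, u, rfl⟩
        obtain ⟨rfl, rfl⟩ : '_' = c ∧ '_' = d := by simpa [List.isPrefixOf] using hp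
        simp only [PySem.Chars.replace.go, hp, if_pos]
        rw [show List.drop (['_','_'] : List Char).length ('_'::'_'::u) = u from rfl,
            ih u (['_'].reverse ++ acc) (by simp at h ⊢; omega)]
        simp [pvRep1]
      · simp only [PySem.Chars.replace.go]
        rw [if_neg (by simpa using hp), ih t (c :: acc) (by simp at h ⊢; omega)]
        have hrep : pvRep1 (c :: t) = c :: pvRep1 t := by
          cases t with
          | nil => rfl
          | cons d u =>
            have hnd : ¬ (c = '_' ∧ d = '_') := by
              rintro ⟨rfl, rfl⟩
              simp [List.isPrefixOf] at hp
            rw [pvRep1, if_neg hnd]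
        rw [hrep]; simp

theorem pvReplace_dd (cs : List Char) :
    PySem.Chars.replace cs ['_','_'] ['_'] = pvRep1 cs := by
  have := pvReplace_go_dd cs.length cs [] (le_refl _)
  simpa [PySem.Chars.replace] using this

theorem pvHasDD_iff_infix (cs : List Char) :
    pvHasDD cs = true ↔ ['_','_'] <:+: cs := by
  induction cs with
  | nil => simp [pvHasDD]
  | cons c t ih =>
    cases t with
    | nil =>
      constructor
      · intro h; simp [pvHasDD] at h
      · intro h
        have := h.length_le
        simp at this
    | cons d u =>
      rw [List.infix_cons_iff]
      constructor
      · intro h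
        rcases (by simpa [pvHasDD] using h : (c = '_' ∧ d = '_') ∨ pvHasDD (d :: u) = true) with ⟨rfl, rfl⟩ | h2
        · exact Or.inl (by simp [List.cons_prefix_cons])
        · exact Or.inr (ih.1 h2)
      · intro h
        rcases h with h | h
        · have h' : '_' = c ∧ '_' = d := by simpa [List.cons_prefix_cons] using h
          obtain ⟨rfl, rfl⟩ := h'
          simp [pvHasDD]
        · have := ih.2 h
          simp [pvHasDD, this]

theorem pvIsIn_dd (cs : List Char) : PySem.Chars.isIn ['_','_'] cs = pvHasDD cs := by
  by_cases h : pvHasDD cs = true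
  · rw [h, (PySem.Chars.isIn_iff_infix _ _).2 ((pvHasDD_iff_infix cs).1 h)]
  · rw [Bool.eq_false_iff.2 h, ← Bool.not_eq_true]
    rw [PySem.Chars.isIn_iff_infix]
    intro hinf
    exact h ((pvHasDD_iff_infix cs).2 hinf)

theorem pvLoop_dec (cs : List Char) (h : PySem.Chars.isIn ['_','_'] cs = true) :
    (PySem.Chars.replace cs ['_','_'] ['_']).length < cs.length := by
  rw [pvReplace_dd]
  exact pvRep1_length_lt cs (by rw [← pvIsIn_dd]; exact h)

/-- A's `while '__' in clean: clean = clean.replace('__','_')` loop, literally. -/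
def pvWhileA (clean : List Char) : List Char :=
  if h : PySem.Chars.isIn ['_','_'] clean = true then
    pvWhileA (PySem.Chars.replace clean ['_','_'] ['_'])
  else clean
termination_by clean.length
decreasing_by exact pvLoop_dec clean h

def suggest_column_name_py (col : String) : String :=
  let clean := PySem.Chars.strip col.toList
  let clean := PySem.Chars.join []
    (clean.map (fun c => if PySem.Chars.isalnum c || c == '_' then [c] else ['_']))
  let clean := PySem.Chars.replace clean [' '] ['_']
  let clean := pvWhileA clean
  String.ofList (PySem.Chars.stripChars clean ['_'])

-- ===== PORT B =====
def suggest_column_name_py_alt (col : String) : String :=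
  let st := (PySem.Chars.strip col.toList).foldl
    (fun (st : List Char × Bool) c =>
      if PySem.Chars.isalnum c then (st.1 ++ [c], false)
      else if st.2 then st
      else (st.1 ++ ['_'], true))
    ([], false)
  String.ofList (PySem.Chars.stripChars st.1 ['_'])

-- ===== PRECONDITION & SPEC =====
def Spec_suggest_column_name_py (col : String) (out : String) : Prop := out = suggest_column_name_py_alt col
instance (col : String) (out : String) : Decidable (Spec_suggest_column_name_py col out) := by unfold Spec_suggest_column_name_py; infer_instance

-- ===== CLAIM (what is proved, stated in full; the proofs are below) =====
def Claim_equal_suggest_column_name_py : Prop := ∀ (col : String), Dom_suggest_column_name_py col → Spec_suggest_column_name_py col (suggest_column_name_py col)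

-- ===== LEMMAS AND PROOFS =====
/-- A's per-character sanitisation step. -/
def pvStep (c : Char) : Char := if PySem.Chars.isalnum c || c == '_' then c else '_'

/-- Collapse runs of '_' to a single '_'; the flag says "previous kept char was '_'". -/
def pvSq : Bool → List Char → List Char
  | _, [] => []
  | b, c :: t => if c = '_' then (if b then pvSq true t else '_' :: pvSq true t) else c :: pvSq false t

/-- The same collapse, phrased on the raw characters the way B's single pass reads them. -/
def pvSqB : Bool → List Char → List Char
  | _, [] => []
  | b, c :: t =>
    if PySem.Chars.isalnum c then c :: pvSqB false t
    else if b then pvSqB true t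
    else '_' :: pvSqB true t

theorem pvJoin_map (l : List Char) :
    PySem.Chars.join [] (l.map (fun c => if PySem.Chars.isalnum c || c == '_' then [c] else ['_']))
      = l.map pvStep := by
  have : (fun c => if PySem.Chars.isalnum c || c == '_' then [c] else ['_'])
       = fun c => [pvStep c] := by
    funext c; unfold pvStep; split <;> rfl
  rw [this, show (fun c => [pvStep c]) = (fun c => ([c] : List Char)) ∘ pvStep from rfl,
      ← List.map_map]
  exact PySem.Chars.join_nil_singletons _

theorem pvStep_ne_space (c : Char) : pvStep c ≠ ' ' := by
  unfold pvStep
  by_cases h : (PySem.Chars.isalnum c || c == '_') = true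
  · rw [if_pos h]
    rcases (by simpa using h : PySem.Chars.isalnum c = true ∨ c = '_') with h1 | rfl
    · intro rfl; exact absurd h1 (by decide)
    · decide
  · rw [if_neg h]; decide

theorem pvReplace_go_space (fuel : Nat) :
    ∀ (l acc : List Char), l.length ≤ fuel → (∀ c ∈ l, c ≠ ' ') →
      PySem.Chars.replace.go [' '] ['_'] fuel l acc = acc.reverse ++ l := by
  induction fuel with
  | zero =>
    intro l acc h _
    have : l = [] := List.eq_nil_of_length_eq_zero (by omega)
    subst this; simp [PySem.Chars.replace.go]
  | succ n ih =>
    intro l acc h hs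
    match l with
    | [] => simp [PySem.Chars.replace.go]
    | c :: t =>
      have hc : c ≠ ' ' := hs c (by simp)
      have hp : List.isPrefixOf [' '] (c :: t) = false := by
        simp [List.isPrefixOf]
        exact fun h => hc h.symm
      simp only [PySem.Chars.replace.go]
      rw [if_neg (by simp [hp]), ih t (c :: acc) (by simp at h ⊢; omega)
            (fun d hd => hs d (by simp [hd]))]
      simp

theorem pvReplace_space (l : List Char) (hs : ∀ c ∈ l, c ≠ ' ') :
    PySem.Chars.replace l [' '] ['_'] = l := by
  have := pvReplace_go_space l.length l [] (le_refl _) hs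
  simpa [PySem.Chars.replace] using this

theorem pvSq_rep1 (l : List Char) : ∀ b, pvSq b (pvRep1 l) = pvSq b l := by
  induction l using pvRep1.induct with
  | case1 c d t h ih =>
    obtain ⟨rfl, rfl⟩ := h
    intro b
    rw [pvRep1, if_pos ⟨rfl, rfl⟩]
    cases b <;> simp [pvSq, ih]
  | case2 c d t h ih =>
    intro b
    rw [pvRep1, if_neg h]
    by_cases hc : c = '_'
    · subst hc
      cases b <;> simp [pvSq, ih]
    · simp [pvSq, hc, ih]
  | case3 l h =>
    intro b
    rw [pvRep1.eq_def]
    cases l with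
    | nil => rfl
    | cons c t => cases t with
      | nil => rfl
      | cons d u => exact absurd rfl (h c d u)

theorem pvSq_noDD (l : List Char) (h : pvHasDD l = false) : pvSq false l = l := by
  induction l using pvRep1.induct with
  | case1 c d t hcd ih =>
    exfalso
    obtain ⟨rfl, rfl⟩ := hcd
    simp [pvHasDD] at h
  | case2 c d t hcd ih =>
    have hdd : pvHasDD (d :: t) = false := by
      rw [pvHasDD, Bool.or_eq_false_iff] at h
      exact h.2
    have hih := ih hdd
    by_cases hc : c = '_'
    · subst hc
      have hd : d ≠ '_' := fun hd => hcd ⟨rfl, hd⟩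
      simp only [pvSq, if_neg hd, if_true] at hih ⊢
      simp only [List.cons.injEq, true_and] at hih
      simp [hih]
    · simp only [pvSq, if_neg hc, Bool.false_eq_true, if_false] at hih ⊢
      rw [hih]
  | case3 l hl =>
    cases l with
    | nil => rfl
    | cons c t => cases t with
      | nil =>
        by_cases hc : c = '_'
        · subst hc; rfl
        · simp [pvSq, hc]
      | cons d u => exact absurd rfl (hl c d u)

theorem pvWhileA_eq_sq (l : List Char) : pvWhileA l = pvSq false l := by
  induction l using pvWhileA.induct with
  | case1 l h ih =>
    rw [pvWhileA, dif_pos h, ih, pvReplace_dd, pvSq_rep1]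
  | case2 l h =>
    rw [pvWhileA, dif_neg h, pvSq_noDD]
    rw [← pvIsIn_dd]
    exact Bool.eq_false_iff.mpr h

theorem pvFold_sqB (l : List Char) : ∀ (acc : List Char) (b : Bool),
    (l.foldl (fun (st : List Char × Bool) c =>
        if PySem.Chars.isalnum c then (st.1 ++ [c], false)
        else if st.2 then st
        else (st.1 ++ ['_'], true)) (acc, b)).1 = acc ++ pvSqB b l := by
  induction l with
  | nil => intro acc b; simp [pvSqB]
  | cons c t ih =>
    intro acc b
    by_cases hc : PySem.Chars.isalnum c = true
    · simp only [List.foldl_cons, if_pos hc, ih, pvSqB, List.append_assoc]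
      simp
    · cases b <;>
        simp only [List.foldl_cons, if_neg hc, Bool.false_eq_true, if_false, if_true,
          ih, pvSqB, List.append_assoc] <;> simp [hc]

theorem pvSq_map_step (l : List Char) : ∀ b, pvSq b (l.map pvStep) = pvSqB b l := by
  induction l with
  | nil => intro b; rfl
  | cons c t ih =>
    intro b
    by_cases hc : PySem.Chars.isalnum c = true
    · have hne : c ≠ '_' := by
        intro rfl; exact absurd hc (by decide)
      have hstep : pvStep c = c := by simp [pvStep, hc]
      simp [pvSq, pvSqB, hstep, hne, hc, ih]
    · have hstep : pvStep c = '_' := by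
        unfold pvStep
        by_cases h2 : c = '_'
        · subst h2; rfl
        · rw [if_neg]; simp [hc, h2]
      cases b <;> simp [pvSq, pvSqB, hstep, hc, ih]

-- ===== VERDICT (by name: the statement is the Claim_ definition above) =====
theorem suggest_column_name_py_spec : Claim_equal_suggest_column_name_py := by
  intro col _
  show suggest_column_name_py col = suggest_column_name_py_alt col
  unfold suggest_column_name_py suggest_column_name_py_alt
  simp only [pvJoin_map]
  rw [pvReplace_space _ (fun c hc => by
        obtain ⟨d, -, rfl⟩ := List.mem_map.1 hc
        exact pvStep_ne_space d),
      pvWhileA_eq_sq, pvSq_map_step, pvFold_sqB _ [] false, List.nil_append]
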